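-- pv_equiv track=rewrite | github.com/seksu/voice-backend | snr-main/segmenter/n_segmenter.py | selectN_aboveR
-- ===== SOURCE A (Python) =====
-- def selectN_aboveR(x, N = 5, R = 3):
--     # x in list of boolean
--     # N elements will been set to True if there are True not less than R elements,
--     # otherwise they will been to False.
--     # return list of boolean
--     cumulative_true = 0 # dynamic programming sum
--     modified_x = [False] * len(x)
--     for i in range(len(x)):
--         cumulative_true += int(x[i])
--         if(i<N-1):
--             continue
--
--         if(cumulative_true >= R):
--             modified_x[i-N+1:i+1] = [True] * N
--
--         cumulative_true -= int(x[i-N+1])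
--
--     return modified_x
-- ===== SOURCE B (Python) =====
-- def selectN_aboveR(x, N = 5, R = 3):
--     # One pass computes which window ends qualify (>= R Trues among the N
--     # elements ending there); a second, reverse sweep marks the union of the
--     # qualifying windows by tracking the nearest qualifying end at or after i.
--     n = len(x)
--     out = [False] * n
--     if N > n:
--         return out
--     good = [False] * n
--     cnt = 0
--     for i in range(n):
--         cnt += int(x[i])
--         if i >= N:
--             cnt -= int(x[i - N])
--         if i >= N - 1 and cnt >= R:
--             good[i] = True
--     nearest = None
--     for i in range(n - 1, -1, -1):
--         if good[i]:
--             nearest = i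
--         if nearest is not None and nearest - i < N:
--             out[i] = True
--     return out
-- ===== Notes on version B (the rewrite author's own statement) =====
-- stated objective: alternative
-- what changed: A rewrites an N-element slice of the output for every qualifying window; B instead computes the qualifying window ends with one sliding count and then marks the union of the windows in a single reverse sweep that tracks the nearest qualifying end.
import Mathlib
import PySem

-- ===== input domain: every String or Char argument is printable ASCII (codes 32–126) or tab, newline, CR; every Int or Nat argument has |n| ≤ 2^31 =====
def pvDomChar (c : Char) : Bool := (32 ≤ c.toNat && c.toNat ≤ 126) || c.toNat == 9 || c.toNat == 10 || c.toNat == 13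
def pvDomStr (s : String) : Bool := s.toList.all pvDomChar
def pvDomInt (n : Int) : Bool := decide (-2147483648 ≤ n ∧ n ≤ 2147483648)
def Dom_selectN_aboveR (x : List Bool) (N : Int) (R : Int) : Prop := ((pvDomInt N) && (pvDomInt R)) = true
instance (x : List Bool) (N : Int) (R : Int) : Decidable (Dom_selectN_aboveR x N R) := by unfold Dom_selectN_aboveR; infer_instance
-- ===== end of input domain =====

-- B replaces A's per-window slice rewrite with two linear passes: a sliding
-- count of qualifying window ends, then one reverse sweep marking the union
-- of the qualifying windows.

-- ===== PORT A =====
-- Python slice assignment modified_x[a:b] = vals; exact for 0 ≤ a ≤ b ≤ l.length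
-- with vals.length = b - a, which is the only way A reaches it under Pre_.
def pySliceAssign (l : List Bool) (a b : Int) (vals : List Bool) : List Bool :=
  l.take (PySem.List.clampIdx l.length a) ++ vals ++ l.drop (PySem.List.clampIdx l.length b)

def selectN_aboveR (x : List Bool) (N : Int) (R : Int) : List Bool :=
  ((PySem.List.pyRange 0 (x.length : Int) 1).foldl
    (fun (st : Int × List Bool) i =>
      let cum := st.1 + (if PySem.List.pyGetD x i false then 1 else 0)
      if i < N - 1 then (cum, st.2)
      else
        let m := if R ≤ cum then
            pySliceAssign st.2 (i - N + 1) (i + 1) (List.replicate N.toNat true)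
          else st.2
        (cum - (if PySem.List.pyGetD x (i - N + 1) false then 1 else 0), m))
    (0, List.replicate x.length false)).2

-- ===== PORT B =====
def selectN_aboveR_alt (x : List Bool) (N : Int) (R : Int) : List Bool :=
  let n : Int := (x.length : Int)
  if n < N then List.replicate x.length false
  else
    let good : List Bool :=
      (((PySem.List.pyRange 0 n 1).foldl
        (fun (st : Int × List Bool) i =>
          let cnt := st.1 + (if PySem.List.pyGetD x i false then 1 else 0)
          let cnt := if N ≤ i then cnt - (if PySem.List.pyGetD x (i - N) false then 1 else 0) else cnt
          (cnt, (decide (N - 1 ≤ i) && decide (R ≤ cnt)) :: st.2))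
        (0, [])).2).reverse
    ((PySem.List.pyRange (n - 1) (-1) (-1)).foldl
      (fun (st : Option Int × List Bool) i =>
        let nearest := if PySem.List.pyGetD good i false then some i else st.1
        let o := match nearest with
          | some e => decide (e - i < N)
          | none => false
        (nearest, o :: st.2))
      (none, [])).2

-- ===== PRECONDITION & SPEC =====
-- Pre_ excludes exactly the inputs on which the Python A raises IndexError
-- (window size N ≤ 0 with a nonempty list: A reads x[i-N+1] past the end).
def Pre_selectN_aboveR (x : List Bool) (N : Int) (R : Int) : Prop := 1 ≤ N ∨ x = []
instance (x : List Bool) (N : Int) (R : Int) : Decidable (Pre_selectN_aboveR x N R) := by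
  unfold Pre_selectN_aboveR; infer_instance

def pvWitness_selectN_aboveR : List Bool × Int × Int := ([true, true, false, true], 2, 2)

def Spec_selectN_aboveR (x : List Bool) (N : Int) (R : Int) (out : List Bool) : Prop :=
  out = selectN_aboveR_alt x N R
instance (x : List Bool) (N : Int) (R : Int) (out : List Bool) : Decidable (Spec_selectN_aboveR x N R out) := by
  unfold Spec_selectN_aboveR; infer_instance

-- ===== CLAIM (what is proved, stated in full; the proofs are below) =====
def Claim_equal_selectN_aboveR : Prop := ∀ (x : List Bool) (N : Int) (R : Int),
  Dom_selectN_aboveR x N R → Pre_selectN_aboveR x N R →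
  Spec_selectN_aboveR x N R (selectN_aboveR x N R)

-- ===== LEMMAS AND PROOFS =====

theorem sliceAssign_map_range (f : Nat → Bool) (n a b : Nat) (ha : a ≤ b) (hb : b ≤ n) :
    pySliceAssign ((List.range n).map f) (a : Int) (b : Int) (List.replicate (b - a) true)
    = (List.range n).map (fun j => if a ≤ j ∧ j < b then true else f j) := by
  unfold pySliceAssign
  rw [List.length_map, List.length_range, PySem.List.clampIdx_natCast, PySem.List.clampIdx_natCast,
    Nat.min_eq_left (le_trans ha hb), Nat.min_eq_left hb]
  apply List.ext_getElem
  · simp [List.length_take, List.length_drop]; omega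
  · intro j h1 h2
    rw [List.getElem_map, List.getElem_range]
    by_cases hja : j < a
    · rw [List.getElem_append_left (by simp [List.length_take]; omega)]
      rw [List.getElem_append_left (by simp [List.length_take]; omega)]
      rw [List.getElem_take, List.getElem_map, List.getElem_range]
      simp; omega
    · by_cases hjb : j < b
      · rw [List.getElem_append_left (by simp [List.length_take, List.length_replicate]; omega)]
        rw [List.getElem_append_right (by simp [List.length_take]; omega)]
        rw [List.getElem_replicate]
        simp; omega
      · rw [List.getElem_append_right (by simp [List.length_take, List.length_replicate]; omega)]
        rw [List.getElem_drop, List.getElem_map, List.getElem_range]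
        simp [List.length_take, List.length_replicate, Nat.min_eq_left (le_trans ha hb), hjb]
        have hj : b + (j - (a + (b - a))) = j := by omega
        rw [hj]

def pcnt (x : List Bool) (m : Nat) : Int := ((x.take m).countP id : Int)
def winC (x : List Bool) (Nn : Nat) (e : Nat) : Int := pcnt x (e + 1) - pcnt x (e + 1 - Nn)
def gB (x : List Bool) (Nn : Nat) (R : Int) (e : Nat) : Bool :=
  decide (Nn - 1 ≤ e) && decide (R ≤ winC x Nn e)
def partP (x : List Bool) (Nn : Nat) (R : Int) (m j : Nat) : Bool :=
  (List.range m).any (fun e => decide (j ≤ e) && decide (e < j + Nn) && gB x Nn R e)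

theorem pcnt_zero (x : List Bool) : pcnt x 0 = 0 := by simp [pcnt]

theorem pcnt_succ (x : List Bool) (m : Nat) (h : m < x.length) :
    pcnt x (m + 1) = pcnt x m + (if x[m] then 1 else 0) := by
  rw [pcnt, pcnt, List.take_add_one, List.getElem?_eq_getElem h]
  cases hx : x[m] <;> simp [List.countP_append, id]

theorem partP_succ (x : List Bool) (Nn : Nat) (R : Int) (m j : Nat) :
    partP x Nn R (m + 1) j
    = (partP x Nn R m j || (decide (j ≤ m) && decide (m < j + Nn) && gB x Nn R m)) := by
  simp [partP, List.range_succ]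

theorem A_inv (x : List Bool) (N R : Int) (hN : 1 ≤ N) (m : Nat) (hm : m ≤ x.length) :
    ((PySem.List.pyRange 0 (m : Int) 1).foldl
      (fun (st : Int × List Bool) i =>
        let cum := st.1 + (if PySem.List.pyGetD x i false then 1 else 0)
        if i < N - 1 then (cum, st.2)
        else
          let mk := if R ≤ cum then
              pySliceAssign st.2 (i - N + 1) (i + 1) (List.replicate N.toNat true)
            else st.2
          (cum - (if PySem.List.pyGetD x (i - N + 1) false then 1 else 0), mk))
      (0, List.replicate x.length false))
    = (pcnt x m - pcnt x (m - (N.toNat - 1)),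
       (List.range x.length).map (partP x N.toNat R m)) := by
  induction m with
  | zero =>
    rw [PySem.List.pyRange_one_eq_nil (by omega)]
    simp only [List.foldl_nil, pcnt_zero, Nat.zero_sub]
    rw [Prod.mk.injEq]
    refine ⟨by ring, ?_⟩
    apply List.ext_getElem (by simp)
    intro j h1 h2
    simp [partP]
  | succ m ih =>
    have hm' : m ≤ x.length := by omega
    have hmx : m < x.length := by omega
    have hcast : ((m + 1 : Nat) : Int) = (m : Int) + 1 := by omega
    rw [hcast, PySem.List.pyRange_one_succ_right (by omega), List.foldl_append, ih hm']
    simp only [List.foldl_cons, List.foldl_nil]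
    rw [PySem.List.pyGetD_natCast, List.getD_eq_getElem x false hmx]
    by_cases hc : (m : Int) < N - 1
    · simp only [hc, if_true]
      rw [Prod.mk.injEq]
      constructor
      · have h1 : m - (N.toNat - 1) = 0 := by omega
        have h2 : m + 1 - (N.toNat - 1) = 0 := by omega
        rw [h1, h2, pcnt_succ x m hmx]
        ring
      · apply List.map_congr_left
        intro j _
        rw [partP_succ]
        have hg : gB x N.toNat R m = false := by
          unfold gB
          rw [decide_eq_false (by omega : ¬ (N.toNat - 1 ≤ m)), Bool.false_and]
        simp [hg]
    · simp only [hc, if_false]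
      have hNm : N.toNat - 1 ≤ m := by omega
      have hcum : pcnt x m - pcnt x (m - (N.toNat - 1)) + (if x[m] then 1 else 0)
          = winC x N.toNat m := by
        rw [winC, pcnt_succ x m hmx]
        have : m + 1 - N.toNat = m - (N.toNat - 1) := by omega
        rw [this]
        ring
      rw [hcum]
      have hidx : (m : Int) - N + 1 = ((m + 1 - N.toNat : Nat) : Int) := by
        omega
      have hidx2 : (m : Int) + 1 = ((m + 1 : Nat) : Int) := by omega
      have hsub : m + 1 - N.toNat < x.length := by omega
      rw [Prod.mk.injEq]
      constructor
      · rw [hidx, PySem.List.pyGetD_natCast, List.getD_eq_getElem x false hsub]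
        have h3 : m + 1 - (N.toNat - 1) = (m + 1 - N.toNat) + 1 := by omega
        rw [h3, pcnt_succ x (m + 1 - N.toNat) hsub]
        cases hx : x[m + 1 - N.toNat] <;> simp [winC] <;> ring
      · by_cases hr : R ≤ winC x N.toNat m
        · simp only [hr, if_true]
          rw [hidx, hidx2]
          have hsa := sliceAssign_map_range (partP x N.toNat R m) x.length (m + 1 - N.toNat)
            (m + 1) (by omega) (by omega)
          have hba : (m + 1) - (m + 1 - N.toNat) = N.toNat := by omega
          rw [hba] at hsa
          rw [hsa]
          apply List.map_congr_left
          intro j _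
          rw [partP_succ]
          have hg : gB x N.toNat R m = true := by
            unfold gB
            rw [decide_eq_true hNm, decide_eq_true hr, Bool.and_true]
          rw [hg, Bool.and_true]
          by_cases hcond : m + 1 - N.toNat ≤ j ∧ j < m + 1
          · rw [if_pos hcond, decide_eq_true (by omega : j ≤ m),
              decide_eq_true (by omega : m < j + N.toNat)]
            simp
          · rw [if_neg hcond]
            have hd : (decide (j ≤ m) && decide (m < j + N.toNat)) = false := by
              rw [← Bool.decide_and]
              exact decide_eq_false (by omega)
            rw [hd, Bool.or_false]
        · simp only [hr, if_false]
          apply List.map_congr_left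
          intro j _
          rw [partP_succ]
          have hg : gB x N.toNat R m = false := by
            unfold gB
            rw [decide_eq_false hr, Bool.and_false]
          simp [hg]

theorem B_inv1 (x : List Bool) (N R : Int) (hN : 1 ≤ N) (m : Nat) (hm : m ≤ x.length) :
    ((PySem.List.pyRange 0 (m : Int) 1).foldl
      (fun (st : Int × List Bool) i =>
        let cnt := st.1 + (if PySem.List.pyGetD x i false then 1 else 0)
        let cnt := if N ≤ i then cnt - (if PySem.List.pyGetD x (i - N) false then 1 else 0) else cnt
        (cnt, (decide (N - 1 ≤ i) && decide (R ≤ cnt)) :: st.2))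
      (0, []))
    = (pcnt x m - pcnt x (m - N.toNat), ((List.range m).map (gB x N.toNat R)).reverse) := by
  induction m with
  | zero =>
    rw [PySem.List.pyRange_one_eq_nil (by omega)]
    simp [pcnt_zero]
  | succ m ih =>
    have hm' : m ≤ x.length := by omega
    have hmx : m < x.length := by omega
    have hcast : ((m + 1 : Nat) : Int) = (m : Int) + 1 := by omega
    rw [hcast, PySem.List.pyRange_one_succ_right (by omega), List.foldl_append, ih hm']
    simp only [List.foldl_cons, List.foldl_nil]
    rw [PySem.List.pyGetD_natCast, List.getD_eq_getElem x false hmx]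
    have hcnt2 : (if N ≤ (m : Int) then
          pcnt x m - pcnt x (m - N.toNat) + (if x[m] then 1 else 0)
            - (if PySem.List.pyGetD x ((m : Int) - N) false then 1 else 0)
        else pcnt x m - pcnt x (m - N.toNat) + (if x[m] then 1 else 0))
        = winC x N.toNat m := by
      by_cases hcm : N ≤ (m : Int)
      · rw [if_pos hcm]
        have hidx : (m : Int) - N = ((m - N.toNat : Nat) : Int) := by omega
        have hsub : m - N.toNat < x.length := by omega
        rw [hidx, PySem.List.pyGetD_natCast, List.getD_eq_getElem x false hsub]
        rw [winC, pcnt_succ x m hmx]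
        have h1 : m + 1 - N.toNat = (m - N.toNat) + 1 := by omega
        rw [h1, pcnt_succ x (m - N.toNat) hsub]
        ring
      · rw [if_neg hcm]
        rw [winC, pcnt_succ x m hmx]
        have h1 : m + 1 - N.toNat = 0 := by omega
        have h2 : m - N.toNat = 0 := by omega
        rw [h1, h2]
        ring
    rw [Prod.mk.injEq]
    constructor
    · rw [hcnt2, winC]
    · rw [hcnt2]
      have hdec : decide (N - 1 ≤ (m : Int)) = decide (N.toNat - 1 ≤ m) := by
        rw [decide_eq_decide]
        omega
      rw [hdec]
      rw [List.range_succ, List.map_append, List.reverse_append]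
      simp [gB]

theorem find?_range'_min (p : Nat → Bool) (k : Nat) :
    ∀ (i e : Nat), List.find? p (List.range' i k) = some e →
      i ≤ e ∧ e < i + k ∧ p e = true ∧ ∀ e', i ≤ e' → e' < e → p e' = false := by
  induction k with
  | zero => intro i e h; simp at h
  | succ k ih =>
    intro i e h
    rw [List.range'_succ] at h
    by_cases hp : p i
    · rw [List.find?_cons_of_pos hp] at h
      obtain rfl : i = e := by injection h
      exact ⟨le_rfl, by omega, hp, fun e' h1 h2 => ((by omega : False).elim)⟩
    · rw [List.find?_cons_of_neg (by simp [hp])] at h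
      obtain ⟨h1, h2, h3, h4⟩ := ih (i + 1) e h
      refine ⟨by omega, by omega, h3, fun e' he1 he2 => ?_⟩
      rcases Nat.eq_or_lt_of_le he1 with rfl | hlt
      · simpa using hp
      · exact h4 e' hlt he2

def nfI (x : List Bool) (Nn : Nat) (R : Int) (i : Nat) : Option Int :=
  (List.find? (gB x Nn R) (List.range' i (x.length - i))).map (fun e => (e : Int))

theorem out_eq (x : List Bool) (N R : Int) (hN : 1 ≤ N) (i : Nat) (hi : i < x.length) :
    (match nfI x N.toNat R i with
      | some e => decide (e - (i : Int) < N)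
      | none => false) = partP x N.toNat R x.length i := by
  rcases hf : List.find? (gB x N.toNat R) (List.range' i (x.length - i)) with _ | e0
  · have hn : nfI x N.toNat R i = none := by unfold nfI; rw [hf]; rfl
    rw [hn]
    show false = partP x N.toNat R x.length i
    rw [List.find?_eq_none] at hf
    symm
    rw [partP, List.any_eq_false]
    intro e he
    rw [List.mem_range] at he
    by_cases hc : i ≤ e ∧ e < i + N.toNat
    · have : gB x N.toNat R e = false := by
        have h5 := hf e (by rw [List.mem_range'_1]; exact ⟨hc.1, by omega⟩)
        simpa using h5
      simp [this]
    · have : (decide (i ≤ e) && decide (e < i + N.toNat)) = false := by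
        rw [← Bool.decide_and]
        exact decide_eq_false hc
      rw [this, Bool.false_and]
      simp
  · obtain ⟨h1, h2, h3, h4⟩ := find?_range'_min (gB x N.toNat R) (x.length - i) i e0 hf
    have hs : nfI x N.toNat R i = some ((e0 : Nat) : Int) := by unfold nfI; rw [hf]; rfl
    rw [hs]
    show decide ((e0 : Int) - (i : Int) < N) = partP x N.toNat R x.length i
    by_cases hlt : e0 < i + N.toNat
    · rw [decide_eq_true (by omega : (e0 : Int) - (i : Int) < N)]
      symm
      rw [partP, List.any_eq_true]
      refine ⟨e0, by rw [List.mem_range]; omega, ?_⟩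
      rw [h3, decide_eq_true h1, decide_eq_true hlt]
      rfl
    · rw [decide_eq_false (by omega : ¬ ((e0 : Int) - (i : Int) < N))]
      symm
      rw [partP, List.any_eq_false]
      intro e he
      rw [List.mem_range] at he
      by_cases hc : i ≤ e ∧ e < i + N.toNat
      · have : gB x N.toNat R e = false := h4 e hc.1 (by omega)
        simp [this]
      · have : (decide (i ≤ e) && decide (e < i + N.toNat)) = false := by
          rw [← Bool.decide_and]
          exact decide_eq_false hc
        rw [this, Bool.false_and]
        simp

theorem B_inv2 (x : List Bool) (N R : Int) (hN : 1 ≤ N) (good : List Bool)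
    (hgood : good = (List.range x.length).map (gB x N.toNat R)) (i : Nat) (hi : i ≤ x.length) :
    ((PySem.List.pyRange ((i : Int) - 1) (-1) (-1)).foldl
      (fun (st : Option Int × List Bool) j =>
        let nearest := if PySem.List.pyGetD good j false then some j else st.1
        let o := match nearest with
          | some e => decide (e - j < N)
          | none => false
        (nearest, o :: st.2))
      (nfI x N.toNat R i, (List.range' i (x.length - i)).map (partP x N.toNat R x.length)))
    = (nfI x N.toNat R 0, (List.range' 0 x.length).map (partP x N.toNat R x.length)) := by
  induction i with
  | zero =>
    rw [PySem.List.pyRange_neg_one_eq_nil (by omega)]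
    simp
  | succ i ih =>
    have hi' : i ≤ x.length := by omega
    have hix : i < x.length := by omega
    have hcast : ((i + 1 : Nat) : Int) - 1 = (i : Int) := by omega
    rw [hcast, PySem.List.pyRange_neg_one_cons (by omega), List.foldl_cons]
    have hget : PySem.List.pyGetD good (i : Int) false = gB x N.toNat R i := by
      rw [PySem.List.pyGetD_natCast, hgood,
        List.getD_eq_getElem _ false (by simp [List.length_map, List.length_range]; omega)]
      rw [List.getElem_map, List.getElem_range]
    have hrs : List.range' i (x.length - i) = i :: List.range' (i + 1) (x.length - (i + 1)) := by
      have : x.length - i = (x.length - (i + 1)) + 1 := by omega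
      rw [this, List.range'_succ]
    have hnf : (if gB x N.toNat R i = true then some ((i : Nat) : Int) else nfI x N.toNat R (i + 1))
        = nfI x N.toNat R i := by
      by_cases hg : gB x N.toNat R i = true
      · rw [if_pos hg]
        unfold nfI
        rw [hrs, List.find?_cons_of_pos hg]
        rfl
      · rw [if_neg hg]
        unfold nfI
        rw [hrs, List.find?_cons_of_neg (by simp at hg; simp [hg])]
    have hsfx : partP x N.toNat R x.length i :: (List.range' (i + 1) (x.length - (i + 1))).map (partP x N.toNat R x.length)
        = (List.range' i (x.length - i)).map (partP x N.toNat R x.length) := by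
      rw [hrs, List.map_cons]
    simp only [hget]
    rw [hnf, out_eq x N R hN i hix, hsfx]
    exact ih hi'

theorem replicate_eq_map_range' (n : Nat) (f : Nat → Bool) (h : ∀ j, f j = false) :
    List.replicate n false = (List.range n).map f := by
  apply List.ext_getElem (by simp)
  intro j h1 h2
  simp [h]

def specL (x : List Bool) (Nn : Nat) (R : Int) : List Bool :=
  (List.range x.length).map (partP x Nn R x.length)

theorem B_eq_spec (x : List Bool) (N R : Int) (hN : 1 ≤ N) :
    selectN_aboveR_alt x N R = specL x N.toNat R := by
  unfold selectN_aboveR_alt specL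
  by_cases hnN : (x.length : Int) < N
  · rw [if_pos hnN]
    apply replicate_eq_map_range'
    intro j
    rw [partP, List.any_eq_false]
    intro e he
    rw [List.mem_range] at he
    rw [gB, decide_eq_false (by omega : ¬ (N.toNat - 1 ≤ e)), Bool.false_and, Bool.and_false]
    simp
  · rw [if_neg hnN]
    rw [B_inv1 x N R hN x.length le_rfl]
    rw [List.reverse_reverse]
    have hB2 := B_inv2 x N R hN ((List.range x.length).map (gB x N.toNat R)) rfl x.length le_rfl
    rw [Nat.sub_self, List.range'_zero, List.map_nil] at hB2
    have hnone : nfI x N.toNat R x.length = none := by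
      unfold nfI
      rw [Nat.sub_self, List.range'_zero]
      rfl
    rw [hnone] at hB2
    simp only [hB2, ← List.range_eq_range']

theorem A_eq_spec (x : List Bool) (N R : Int) (hN : 1 ≤ N) :
    selectN_aboveR x N R = specL x N.toNat R := by
  unfold selectN_aboveR specL
  rw [A_inv x N R hN x.length le_rfl]

-- ===== VERDICT (by name: the statement is the Claim_ definition above) =====
theorem selectN_aboveR_spec : Claim_equal_selectN_aboveR := by
  intro x N R _ hPre
  unfold Spec_selectN_aboveR
  rcases hPre with hN | hx
  · rw [A_eq_spec x N R hN, B_eq_spec x N R hN]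
  · subst hx
    simp [selectN_aboveR, selectN_aboveR_alt, PySem.List.pyRange_one_eq_nil (by omega : (0:Int) ≤ 0),
      PySem.List.pyRange_neg_one_eq_nil (by omega : (-1:Int) ≤ -1)]
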